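-- pv_equiv track=rewrite | github.com/provost414/tp-algo1.2 | TP1_valentin_provost.py | reacomodar_piramide
-- ===== SOURCE A (Python) =====
-- def reacomodar_piramide(filas, palitos) -> list[list[str]]:
--
--     guardar_palitos_por_filas_bis = []
--
--     for i in range(0, filas+1):
--         fila = palitos[:i]
--         guardar_palitos_por_filas_bis.append(fila)
--         palitos = palitos[i:]
--
--     guardar_palitos_por_filas_bis = [fila for fila in guardar_palitos_por_filas_bis if fila != []]
--
--     if len(guardar_palitos_por_filas_bis) > 1:
--
--         ultima_fila = len(guardar_palitos_por_filas_bis)-1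
--
--         if len(guardar_palitos_por_filas_bis[ultima_fila]) <= len(guardar_palitos_por_filas_bis[ultima_fila-1]):
--             i = 0
--
--             while len(guardar_palitos_por_filas_bis[ultima_fila]) > 0:
--                 guardar_palitos_por_filas_bis[i].append(guardar_palitos_por_filas_bis[ultima_fila].pop())
--                 i = i + 1
--             guardar_palitos_por_filas_bis.pop()
--
--     return guardar_palitos_por_filas_bis
-- ===== SOURCE B (Python) =====
-- def reacomodar_piramide(filas, palitos) -> list[list[str]]:
--     # Single pass: cut rows of sizes 1,2,... directly, stopping as soon as the
--     # sticks run out (surplus beyond `filas` rows is discarded as in A).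
--     rows = []
--     pos = 0
--     i = 1
--     while i <= filas and pos < len(palitos):
--         rows.append(palitos[pos:pos + i])
--         pos += i
--         i += 1
--     # If the last row is not longer than the previous one, recombine: drop it
--     # and extend rows 0,1,... with its elements taken from the back.
--     if len(rows) > 1 and len(rows[-1]) <= len(rows[-2]):
--         last = rows.pop()
--         rows = [row + [x] for row, x in zip(rows, reversed(last))] + rows[len(last):]
--     return rows
-- ===== Notes on version B (the rewrite author's own statement) =====
-- stated objective: faster
-- what changed: One early-stopping pass cuts rows of sizes 1,2,... directly from positions (no repeated tail re-slicing, no filtering of empty rows), and the redistribution is a zip of the reversed leftover with the leading rows instead of A's in-place pop-and-append while loop.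
import Mathlib
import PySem

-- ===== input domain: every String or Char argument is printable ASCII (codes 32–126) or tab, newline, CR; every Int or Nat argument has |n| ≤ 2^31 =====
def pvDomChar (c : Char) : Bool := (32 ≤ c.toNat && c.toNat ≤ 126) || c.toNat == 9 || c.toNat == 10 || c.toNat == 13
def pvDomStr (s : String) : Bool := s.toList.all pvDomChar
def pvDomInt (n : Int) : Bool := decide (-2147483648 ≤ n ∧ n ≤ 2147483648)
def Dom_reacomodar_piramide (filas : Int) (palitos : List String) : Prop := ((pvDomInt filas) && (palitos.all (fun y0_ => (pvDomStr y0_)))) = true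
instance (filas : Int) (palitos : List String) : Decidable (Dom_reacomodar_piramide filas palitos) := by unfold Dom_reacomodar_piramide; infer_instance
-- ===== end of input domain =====

-- B replaces A's range-and-filter row building and in-place pop/append while loop by one
-- early-stopping cutting pass plus a zip recombination of the reversed leftover row.

-- ===== PORT A =====
-- the while loop: `while len(rows[ultima]) > 0: rows[i].append(rows[ultima].pop()); i += 1`
-- (fuel = initial length of rows[ultima]; each iteration removes one element of it,
-- exactly Python's iteration count). In-range Python indexing ported as List.getD/getLast?.
def pvAWhile (fuel : Nat) (rows : List (List String)) (ultima i : Nat) : List (List String) :=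
  match fuel with
  | 0 => rows
  | fuel + 1 =>
    let last := rows.getD ultima []
    if last.length > 0 then
      let x := (last.getLast?).getD ""                  -- rows[ultima].pop()
      let rows' := rows.set ultima last.dropLast
      let rows'' := rows'.set i ((rows'.getD i []) ++ [x])  -- rows[i].append(x)
      pvAWhile fuel rows'' ultima (i + 1)
    else rows

def reacomodar_piramide (filas : Int) (palitos : List String) : List (List String) :=
  let built := (PySem.List.pyRange 0 (filas + 1) 1).foldl
      (fun (st : List (List String) × List String) i =>
        (st.1 ++ [PySem.List.slice st.2 none (some i)],   -- fila = palitos[:i]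
         PySem.List.slice st.2 (some i) none))            -- palitos = palitos[i:]
      (([] : List (List String)), palitos)
  let rows := built.1.filter (fun fila => fila ≠ [])
  if rows.length > 1 then
    let ultima := rows.length - 1
    if (rows.getD ultima []).length ≤ (rows.getD (ultima - 1) []).length then
      (pvAWhile (rows.getD ultima []).length rows ultima 0).dropLast  -- rows.pop() at the end
    else rows
  else rows

-- ===== PORT B =====
-- the while loop: `while i <= filas and pos < len(palitos): rows.append(palitos[pos:pos+i]); …`
-- (parameter i below is Python's i - 1, so the loop starts at i = 0)
def pvBBuild (filas : Int) (palitos : List String) (pos i : Nat) : List (List String) :=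
  if h : (i : Int) + 1 ≤ filas ∧ pos < palitos.length then
    ((palitos.drop pos).take (i + 1)) :: pvBBuild filas palitos (pos + (i + 1)) (i + 1)
  else []
termination_by palitos.length - pos
decreasing_by omega

def reacomodar_piramide_alt (filas : Int) (palitos : List String) : List (List String) :=
  let rows := pvBBuild filas palitos 0 0
  let last := (rows.getLast?).getD []                       -- rows[-1]
  let body := rows.dropLast                                 -- rows after rows.pop()
  if rows.length > 1 ∧ last.length ≤ ((body.getLast?).getD []).length then
    (body.zip last.reverse).map (fun p => p.1 ++ [p.2]) ++ body.drop last.length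
  else rows

-- ===== PRECONDITION & SPEC =====
def Spec_reacomodar_piramide (filas : Int) (palitos : List String) (out : List (List String)) : Prop := out = reacomodar_piramide_alt filas palitos
instance (filas : Int) (palitos : List String) (out : List (List String)) : Decidable (Spec_reacomodar_piramide filas palitos out) := by unfold Spec_reacomodar_piramide; infer_instance

-- ===== CLAIM (what is proved, stated in full; the proofs are below) =====
def Claim_equal_reacomodar_piramide : Prop := ∀ (filas : Int) (palitos : List String), Dom_reacomodar_piramide filas palitos → Spec_reacomodar_piramide filas palitos (reacomodar_piramide filas palitos)

-- ===== LEMMAS AND PROOFS =====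

-- proof-side normal form of the row list: `cnt` more rows allowed, next row size `i0`
def bCut : Nat → Nat → List String → List (List String)
  | 0, _, _ => []
  | cnt + 1, i0, rest => if rest = [] then [] else rest.take i0 :: bCut cnt (i0 + 1) (rest.drop i0)

theorem bCut_nil (cnt i0 : Nat) : bCut cnt i0 [] = [] := by
  cases cnt <;> simp [bCut]

theorem bCut_row_len (cnt : Nat) :
    ∀ (i0 : Nat) (rest : List String) (j : Nat),
      ((bCut cnt i0 rest).getD j []).length ≤ i0 + j := by
  induction cnt with
  | zero => intro i0 rest j; simp [bCut]
  | succ n ih =>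
    intro i0 rest j
    rw [bCut]
    by_cases hr : rest = []
    · simp [hr]
    · rw [if_neg hr]
      cases j with
      | zero => simp
      | succ m =>
        simp only [List.getD_cons_succ]
        have := ih (i0 + 1) (rest.drop i0) m
        omega

-- B's builder produces exactly the bCut rows
theorem pvBBuild_eq_bCut (filas : Int) (palitos : List String) :
    ∀ (cnt pos i : Nat), (filas - i).toNat = cnt →
      pvBBuild filas palitos pos i = bCut cnt (i + 1) (palitos.drop pos) := by
  intro cnt
  induction cnt with
  | zero =>
    intro pos i h
    rw [pvBBuild]
    have hng : ¬ ((i : Int) + 1 ≤ filas ∧ pos < palitos.length) := by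
      rintro ⟨h1, _⟩; omega
    rw [dif_neg hng]
    simp [bCut]
  | succ n ih =>
    intro pos i h
    rw [pvBBuild, bCut]
    by_cases hp : pos < palitos.length
    · have hf : (i : Int) + 1 ≤ filas := by omega
      have hne : palitos.drop pos ≠ [] := by
        simp [List.drop_eq_nil_iff]; omega
      rw [dif_pos ⟨hf, hp⟩, if_neg hne]
      rw [ih (pos + (i + 1)) (i + 1) (by omega)]
      simp [List.drop_drop]
    · have hng : ¬ ((i : Int) + 1 ≤ filas ∧ pos < palitos.length) := by
        rintro ⟨_, h2⟩; exact hp h2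
      have hdn : palitos.drop pos = [] := by
        simp [List.drop_eq_nil_iff]; omega
      rw [dif_neg hng]
      simp [hdn]

-- A's fold-and-filter row building produces the same bCut rows
theorem foldA_eq_bCut (cnt : Nat) :
    ∀ (i0 : Nat) (rest : List String) (acc : List (List String)), 1 ≤ i0 →
      ((((List.range' i0 cnt 1).map (fun k => ((k : Nat) : Int))).foldl
        (fun (st : List (List String) × List String) i =>
          (st.1 ++ [PySem.List.slice st.2 none (some i)],
           PySem.List.slice st.2 (some i) none)) (acc, rest)).1.filter (fun fila => fila ≠ [])) =
      acc.filter (fun fila => fila ≠ []) ++ bCut cnt i0 rest := by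
  induction cnt with
  | zero => intro i0 rest acc _; simp [bCut]
  | succ n ih =>
    intro i0 rest acc h1
    rw [List.range'_succ, bCut]
    simp only [List.map_cons, List.foldl_cons]
    rw [PySem.List.slice_to_natCast, PySem.List.slice_from_natCast]
    rw [ih (i0 + 1) (rest.drop i0) (acc ++ [rest.take i0]) (by omega)]
    by_cases hr : rest = []
    · subst hr
      simp [bCut_nil]
    · rw [if_neg hr]
      have hne : rest.take i0 ≠ [] := by
        simp [List.take_eq_nil_iff]
        constructor <;> [omega; exact hr]
      rw [List.filter_append]
      simp [hne]

-- the while loop pops the leftover row from the back onto rows i, i+1, …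
theorem pvAWhile_spec (n : Nat) :
    ∀ (l : List String) (body : List (List String)) (i : Nat),
      l.length = n → i + l.length ≤ body.length →
      pvAWhile l.length (body ++ [l]) body.length i =
        (body.take i ++ ((body.drop i).zip l.reverse).map (fun p => p.1 ++ [p.2]) ++
          body.drop (i + l.length)) ++ [[]] := by
  induction n with
  | zero =>
    intro l body i hl hle
    have hln : l = [] := List.eq_nil_of_length_eq_zero hl
    subst hln
    simp [pvAWhile]
  | succ m ih =>
    intro l body i hl hle
    have hlne : l ≠ [] := by intro h; subst h; simp at hl
    have hib : i < body.length := by omega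
    rw [hl]
    simp only [pvAWhile]
    have hget : (body ++ [l]).getD body.length [] = l := by
      simp [List.getD_eq_getElem?_getD]
    rw [hget]
    rw [if_pos (by omega : l.length > 0)]
    have hx : (l.getLast?).getD "" = l.getLast hlne := by
      rw [List.getLast?_eq_some_getLast hlne]; rfl
    rw [hx]
    have hset1 : (body ++ [l]).set body.length l.dropLast = body ++ [l.dropLast] := by
      rw [List.set_append]; simp
    rw [hset1]
    have hgetDi : (body ++ [l.dropLast]).getD i [] = body[i] := by
      simp [List.getD_eq_getElem?_getD, List.getElem?_append_left hib,
        List.getElem?_eq_getElem hib]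
    rw [hgetDi]
    have hset2 : (body ++ [l.dropLast]).set i (body[i] ++ [l.getLast hlne]) =
        body.set i (body[i] ++ [l.getLast hlne]) ++ [l.dropLast] := by
      rw [List.set_append, if_pos hib]
    rw [hset2]
    have hdm : l.dropLast.length = m := by
      rw [List.length_dropLast, hl]; omega
    have hblen : body.length = (body.set i (body[i] ++ [l.getLast hlne])).length := by
      rw [List.length_set]
    rw [hblen]
    rw [← hdm]
    rw [ih l.dropLast (body.set i (body[i] ++ [l.getLast hlne])) (i+1) hdm
      (by rw [List.length_set]; omega)]
    have h1 : (body.set i (body[i] ++ [l.getLast hlne])).take (i+1) =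
        body.take i ++ [body[i] ++ [l.getLast hlne]] := by
      rw [List.take_set, List.take_add_one, List.getElem?_eq_getElem hib]
      rw [List.set_append]
      simp [List.length_take, Nat.min_eq_left (le_of_lt hib)]
    have h2 : (body.set i (body[i] ++ [l.getLast hlne])).drop (i+1) = body.drop (i+1) := by
      rw [List.drop_set, if_pos (by omega : i < i + 1)]
    have h3 : (body.set i (body[i] ++ [l.getLast hlne])).drop (i+1+l.dropLast.length) =
        body.drop (i+1+l.dropLast.length) := by
      rw [List.drop_set, if_pos (by omega : i < i + 1 + l.dropLast.length)]
    rw [h1, h2, h3]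
    have hrev : l.reverse = l.getLast hlne :: l.dropLast.reverse := by
      conv_lhs => rw [← List.dropLast_append_getLast hlne]
      simp
    rw [hrev]
    have hdropi : body.drop i = body[i] :: body.drop (i+1) := List.drop_eq_getElem_cons hib
    rw [hdropi]
    have harith : i + (l.dropLast.length + 1) = i + 1 + l.dropLast.length := by omega
    rw [harith]
    simp [List.append_assoc]
    rw [hdropi, List.zip_cons_cons, List.map_cons, List.cons_append]

-- Python rows[-1] / rows[-2] as getD accesses
theorem getD_last (xs : List (List String)) (_h : xs ≠ []) :
    xs.getD (xs.length - 1) [] = (xs.getLast?).getD [] := by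
  rw [List.getD_eq_getElem?_getD, List.getLast?_eq_getElem?]

theorem getD_prev (xs : List (List String)) (h : 1 < xs.length) :
    xs.getD (xs.length - 1 - 1) [] = (xs.dropLast.getLast?).getD [] := by
  rw [List.getD_eq_getElem?_getD, List.getLast?_eq_getElem?, List.length_dropLast]
  rw [List.getElem?_dropLast]
  rw [if_pos (by omega)]

-- ===== VERDICT (by name: the statement is the Claim_ definition above) =====
theorem reacomodar_piramide_spec : Claim_equal_reacomodar_piramide := by
  intro filas palitos _
  unfold Spec_reacomodar_piramide
  simp only [reacomodar_piramide, reacomodar_piramide_alt]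
  have hrowsB : pvBBuild filas palitos 0 0 = bCut filas.toNat 1 palitos := by
    have h := pvBBuild_eq_bCut filas palitos filas.toNat 0 0 (by omega)
    simpa using h
  have hrowsA :
      (((PySem.List.pyRange 0 (filas + 1) 1).foldl
        (fun (st : List (List String) × List String) i =>
          (st.1 ++ [PySem.List.slice st.2 none (some i)],
           PySem.List.slice st.2 (some i) none))
        (([] : List (List String)), palitos)).1.filter (fun fila => fila ≠ [])) =
      bCut filas.toNat 1 palitos := by
    by_cases hf : 0 ≤ filas
    · have hpr : PySem.List.pyRange 0 (filas + 1) 1 =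
          (List.range' 0 (filas.toNat + 1) 1).map (fun k => ((k : Nat) : Int)) := by
        rw [PySem.List.pyRange_one]
        have h1 : (filas + 1 - 0).toNat = filas.toNat + 1 := by omega
        rw [h1, List.range_eq_range']
        simp
      rw [hpr, List.range'_succ]
      simp only [List.map_cons, List.foldl_cons]
      rw [PySem.List.slice_to_natCast, PySem.List.slice_from_natCast]
      simp only [List.take_zero, List.drop_zero, List.nil_append]
      rw [foldA_eq_bCut filas.toNat 1 palitos [[]] (le_refl 1)]
      simp
    · have hz : PySem.List.pyRange 0 (filas + 1) 1 = [] := by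
        rw [PySem.List.pyRange_one]
        have h1 : (filas + 1 - 0).toNat = 0 := by omega
        rw [h1]; simp
      rw [hz]
      have h0 : filas.toNat = 0 := by omega
      rw [h0]
      simp [bCut]
  rw [hrowsA, hrowsB]
  set rows := bCut filas.toNat 1 palitos with hrows
  by_cases hlen : rows.length > 1
  · have hne : rows ≠ [] := by
      intro h; rw [h] at hlen; simp at hlen
    have hgl := getD_last rows hne
    have hgp := getD_prev rows hlen
    rw [if_pos hlen, hgl, hgp]
    by_cases hc : (rows.getLast?.getD []).length ≤ (rows.dropLast.getLast?.getD []).length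
    · rw [if_pos hc, if_pos ⟨hlen, hc⟩]
      have hl : rows.getLast?.getD [] = rows.getLast hne := by
        rw [List.getLast?_eq_some_getLast hne]; rfl
      have hsplit : rows.dropLast ++ [rows.getLast hne] = rows :=
        List.dropLast_append_getLast hne
      have hprevlen : (rows.dropLast.getLast?.getD []).length ≤ rows.length - 1 := by
        rw [← hgp]
        have hb := bCut_row_len filas.toNat 1 palitos (rows.length - 1 - 1)
        rw [← hrows] at hb
        omega
      have hlb : 0 + (rows.getLast hne).length ≤ rows.dropLast.length := by
        rw [List.length_dropLast, ← hl]; omega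
      have hulen : rows.length - 1 = rows.dropLast.length := by
        rw [List.length_dropLast]
      have key := pvAWhile_spec (rows.getLast hne).length (rows.getLast hne)
        rows.dropLast 0 rfl hlb
      rw [hsplit] at key
      rw [hl, hulen, key]
      rw [List.dropLast_concat]
      simp
    · rw [if_neg hc, if_neg (by tauto)]
  · rw [if_neg hlen, if_neg (by tauto)]
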